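-- pv_equiv track=rewrite | github.com/priyaviradiya/licence-plate-recognition | main.py | correct_plate_format
-- ===== SOURCE A (Python) =====
-- def correct_plate_format(ocr_plate):
--     mapping_num_to_char = {'0': 'O', '1': 'I', '2': 'Z', '5': 'S', '8': 'B'}
--     mapping_char_to_num = {'O': '0', 'I': '1', 'Z': '2', 'S': '5', 'B': '8'}
--
--     ocr_text = ocr_plate.upper().replace(" ", "")
--     if len(ocr_text) != 7:
--         return None
--
--     corrected = []
--     for i, ch in enumerate(ocr_text):
--         if i < 2 or i >= 4:  # Expected letters
--             if ch.isdigit() and ch in mapping_num_to_char: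
--                 corrected.append(mapping_num_to_char[ch])
--             elif ch.isalpha():
--                 corrected.append(ch)
--             else:
--                 return None
--         else:  # Expected digits
--             if ch.isalpha() and ch in mapping_char_to_num:
--                 corrected.append(mapping_char_to_num[ch])
--             elif ch.isdigit():
--                 corrected.append(ch)
--             else:
--                 return None
--
--     return ''.join(corrected)
-- ===== SOURCE B (Python) =====
-- def correct_plate_format(ocr_plate):
--     n2c = str.maketrans({'0': 'O', '1': 'I', '2': 'Z', '5': 'S', '8': 'B'})
--     c2n = str.maketrans({'O': '0', 'I': '1', 'Z': '2', 'S': '5', 'B': '8'})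
--
--     s = ocr_plate.upper().replace(" ", "")
--     if len(s) != 7:
--         return None
--
--     l1 = s[0:2].translate(n2c)
--     d = s[2:4].translate(c2n)
--     l2 = s[4:7].translate(n2c)
--     if l1.isalpha() and l2.isalpha() and d.isdigit():
--         return l1 + d + l2
--     return None
-- ===== Notes on version B (the rewrite author's own statement) =====
-- stated objective: idiomatic
-- what changed: Replaced A's per-character enumerate loop with index-range branches by fixed-zone slicing (letters/digits/letters) with whole-segment translate-then-validate (isalpha/isdigit), returning the concatenation.
import Mathlib
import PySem

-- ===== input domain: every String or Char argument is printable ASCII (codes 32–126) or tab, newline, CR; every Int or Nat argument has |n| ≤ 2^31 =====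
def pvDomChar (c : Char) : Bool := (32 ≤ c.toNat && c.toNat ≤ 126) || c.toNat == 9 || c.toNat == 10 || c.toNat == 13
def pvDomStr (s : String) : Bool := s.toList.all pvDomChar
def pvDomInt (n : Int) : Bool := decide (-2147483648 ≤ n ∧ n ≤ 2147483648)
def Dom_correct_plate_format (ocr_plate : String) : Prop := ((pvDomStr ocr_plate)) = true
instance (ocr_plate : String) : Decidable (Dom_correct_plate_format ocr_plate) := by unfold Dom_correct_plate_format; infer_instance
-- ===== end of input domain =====

-- B replaces A's per-character index-branch loop by fixed-zone slicing with whole-segment translate+validate (objective: idiomatic/simpler).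

-- ===== PORT A =====
def cpfMapNC : PySem.Dict Char Char := PySem.Dict.mk [('0','O'),('1','I'),('2','Z'),('5','S'),('8','B')]
def cpfMapCN : PySem.Dict Char Char := PySem.Dict.mk [('O','0'),('I','1'),('Z','2'),('S','5'),('B','8')]

-- the enumerate loop of A, building `corrected` front-to-back; `none` = the early `return None`
def cpfLoop : Nat → List Char → Option (List Char)
  | _, [] => some []
  | i, ch :: rest =>
    if i < 2 || 4 ≤ i then
      if PySem.Chars.isdigit ch && cpfMapNC.contains ch then
        match cpfMapNC.get? ch with
        | some m => (cpfLoop (i+1) rest).map (m :: ·)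
        | none => none
      else if PySem.Chars.isalpha ch then (cpfLoop (i+1) rest).map (ch :: ·)
      else none
    else
      if PySem.Chars.isalpha ch && cpfMapCN.contains ch then
        match cpfMapCN.get? ch with
        | some m => (cpfLoop (i+1) rest).map (m :: ·)
        | none => none
      else if PySem.Chars.isdigit ch then (cpfLoop (i+1) rest).map (ch :: ·)
      else none

def correct_plate_format (ocr_plate : String) : Option String :=
  let ocr_text := PySem.Chars.replace (PySem.Chars.upper ocr_plate.toList) [' '] []
  if ocr_text.length ≠ 7 then none
  else (cpfLoop 0 ocr_text).map String.ofList

-- ===== PORT B =====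
-- translate with a 1-char→1-char table: map each char through the dict, unmapped chars unchanged (exact for these tables)
def cpfTranslate (m : PySem.Dict Char Char) (cs : List Char) : List Char :=
  cs.map (fun c => (m.get? c).getD c)

def correct_plate_format_alt (ocr_plate : String) : Option String :=
  let s := PySem.Chars.replace (PySem.Chars.upper ocr_plate.toList) [' '] []
  if s.length ≠ 7 then none
  else
    let l1 := cpfTranslate cpfMapNC (PySem.List.slice s (some 0) (some 2))
    let d  := cpfTranslate cpfMapCN (PySem.List.slice s (some 2) (some 4))
    let l2 := cpfTranslate cpfMapNC (PySem.List.slice s (some 4) (some 7))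
    if PySem.Chars.strIsalpha l1 && PySem.Chars.strIsalpha l2 && PySem.Chars.strIsdigit d then
      some (String.ofList (l1 ++ d ++ l2))
    else none

-- ===== PRECONDITION & SPEC =====
def Spec_correct_plate_format (ocr_plate : String) (out : Option String) : Prop := out = correct_plate_format_alt ocr_plate
instance (ocr_plate : String) (out : Option String) : Decidable (Spec_correct_plate_format ocr_plate out) := by unfold Spec_correct_plate_format; infer_instance

-- ===== CLAIM (what is proved, stated in full; the proofs are below) =====
def Claim_equal_correct_plate_format : Prop := ∀ (ocr_plate : String), Dom_correct_plate_format ocr_plate → Spec_correct_plate_format ocr_plate (correct_plate_format ocr_plate)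

-- ===== LEMMAS AND PROOFS =====

-- B's translated char at a letter position
def cpfTNC (c : Char) : Char := (cpfMapNC.get? c).getD c
def cpfTCN (c : Char) : Char := (cpfMapCN.get? c).getD c

theorem cpf_stepL (c : Char) (k : Option (List Char)) :
    (if PySem.Chars.isdigit c && cpfMapNC.contains c then
       match cpfMapNC.get? c with
       | some m => k.map (m :: ·)
       | none => none
     else if PySem.Chars.isalpha c then k.map (c :: ·)
     else none)
    = (if PySem.Chars.isalpha (cpfTNC c) then k.map (cpfTNC c :: ·) else none) := by
  by_cases h0 : c = '0'; · subst h0; simp [cpfTNC, cpfMapNC]; rfl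
  by_cases h1 : c = '1'; · subst h1; simp [cpfTNC, cpfMapNC]; rfl
  by_cases h2 : c = '2'; · subst h2; simp [cpfTNC, cpfMapNC]; rfl
  by_cases h5 : c = '5'; · subst h5; simp [cpfTNC, cpfMapNC]; rfl
  by_cases h8 : c = '8'; · subst h8; simp [cpfTNC, cpfMapNC]; rfl
  have hg : cpfMapNC.get? c = none := by
    simp only [cpfMapNC, PySem.Dict.get?]
    have e0 : ('0' == c) = false := by simp [Ne.symm h0]
    have e1 : ('1' == c) = false := by simp [Ne.symm h1]
    have e2 : ('2' == c) = false := by simp [Ne.symm h2]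
    have e5 : ('5' == c) = false := by simp [Ne.symm h5]
    have e8 : ('8' == c) = false := by simp [Ne.symm h8]
    simp [List.find?, e0, e1, e2, e5, e8]
  have hc : cpfMapNC.contains c = false := by
    rw [PySem.Dict.contains_eq_isSome_get?, hg]; rfl
  simp [hc, cpfTNC, hg]

theorem cpf_stepD (c : Char) (k : Option (List Char)) :
    (if PySem.Chars.isalpha c && cpfMapCN.contains c then
       match cpfMapCN.get? c with
       | some m => k.map (m :: ·)
       | none => none
     else if PySem.Chars.isdigit c then k.map (c :: ·)
     else none)
    = (if PySem.Chars.isdigit (cpfTCN c) then k.map (cpfTCN c :: ·) else none) := by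
  by_cases hO : c = 'O'; · subst hO; simp [cpfTCN, cpfMapCN]; rfl
  by_cases hI : c = 'I'; · subst hI; simp [cpfTCN, cpfMapCN]; rfl
  by_cases hZ : c = 'Z'; · subst hZ; simp [cpfTCN, cpfMapCN]; rfl
  by_cases hS : c = 'S'; · subst hS; simp [cpfTCN, cpfMapCN]; rfl
  by_cases hB : c = 'B'; · subst hB; simp [cpfTCN, cpfMapCN]; rfl
  have hg : cpfMapCN.get? c = none := by
    simp only [cpfMapCN, PySem.Dict.get?]
    have eO : ('O' == c) = false := by simp [Ne.symm hO]
    have eI : ('I' == c) = false := by simp [Ne.symm hI]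
    have eZ : ('Z' == c) = false := by simp [Ne.symm hZ]
    have eS : ('S' == c) = false := by simp [Ne.symm hS]
    have eB : ('B' == c) = false := by simp [Ne.symm hB]
    simp [List.find?, eO, eI, eZ, eS, eB]
  have hc : cpfMapCN.contains c = false := by
    rw [PySem.Dict.contains_eq_isSome_get?, hg]; rfl
  simp [hc, cpfTCN, hg]

theorem cpf_core (a b c d e f g : Char) :
    (cpfLoop 0 [a,b,c,d,e,f,g]).map String.ofList
    = (let l1 := cpfTranslate cpfMapNC (PySem.List.slice [a,b,c,d,e,f,g] (some 0) (some 2))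
       let dd := cpfTranslate cpfMapCN (PySem.List.slice [a,b,c,d,e,f,g] (some 2) (some 4))
       let l2 := cpfTranslate cpfMapNC (PySem.List.slice [a,b,c,d,e,f,g] (some 4) (some 7))
       if PySem.Chars.strIsalpha l1 && PySem.Chars.strIsalpha l2 && PySem.Chars.strIsdigit dd then
         some (String.ofList (l1 ++ dd ++ l2))
       else none) := by
  show (cpfLoop 0 [a,b,c,d,e,f,g]).map String.ofList = _
  rw [show cpfLoop 0 [a,b,c,d,e,f,g]
      = (if PySem.Chars.isalpha (cpfTNC a) then
          (if PySem.Chars.isalpha (cpfTNC b) then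
            (if PySem.Chars.isdigit (cpfTCN c) then
              (if PySem.Chars.isdigit (cpfTCN d) then
                (if PySem.Chars.isalpha (cpfTNC e) then
                  (if PySem.Chars.isalpha (cpfTNC f) then
                    (if PySem.Chars.isalpha (cpfTNC g) then
                      (some [] : Option (List Char)).map (cpfTNC g :: ·)
                     else none).map (cpfTNC f :: ·)
                   else none).map (cpfTNC e :: ·)
                 else none).map (cpfTCN d :: ·)
               else none).map (cpfTCN c :: ·)
             else none).map (cpfTNC b :: ·)
           else none).map (cpfTNC a :: ·)
         else none) from by
    simp only [cpfLoop, show ((0:Nat) < 2 || 4 ≤ (0:Nat)) = true from rfl,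
      show ((1:Nat) < 2 || 4 ≤ (1:Nat)) = true from rfl,
      show ((2:Nat) < 2 || 4 ≤ (2:Nat)) = false from rfl,
      show ((3:Nat) < 2 || 4 ≤ (3:Nat)) = false from rfl,
      show ((4:Nat) < 2 || 4 ≤ (4:Nat)) = true from rfl,
      show ((5:Nat) < 2 || 4 ≤ (5:Nat)) = true from rfl,
      show ((6:Nat) < 2 || 4 ≤ (6:Nat)) = true from rfl,
      if_true, if_false, Bool.false_eq_true]
    rw [cpf_stepL a, cpf_stepL b, cpf_stepD c, cpf_stepD d, cpf_stepL e, cpf_stepL f, cpf_stepL g]]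
  have s1 : PySem.List.slice [a,b,c,d,e,f,g] (some 0) (some 2) = [a,b] := by
    simp [PySem.List.slice, PySem.List.clampIdx]
  have s2 : PySem.List.slice [a,b,c,d,e,f,g] (some 2) (some 4) = [c,d] := by
    simp [PySem.List.slice, PySem.List.clampIdx]
  have s3 : PySem.List.slice [a,b,c,d,e,f,g] (some 4) (some 7) = [e,f,g] := by
    simp [PySem.List.slice, PySem.List.clampIdx]
  simp only [s1, s2, s3, cpfTranslate, List.map, PySem.Chars.strIsalpha, PySem.Chars.strIsdigit,
    cpfTNC, cpfTCN, List.all_cons, List.all_nil]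
  split_ifs <;> simp_all

-- ===== VERDICT (by name: the statement is the Claim_ definition above) =====
theorem correct_plate_format_spec : Claim_equal_correct_plate_format := by
  intro s _
  unfold Spec_correct_plate_format correct_plate_format correct_plate_format_alt
  set t := PySem.Chars.replace (PySem.Chars.upper s.toList) [' '] [] with ht
  by_cases h7 : t.length = 7
  · simp only [h7, ne_eq, not_true_eq_false, if_false]
    rcases t with _ | ⟨a, _ | ⟨b, _ | ⟨c, _ | ⟨d, _ | ⟨e, _ | ⟨f, _ | ⟨g, _ | ⟨x, rest⟩⟩⟩⟩⟩⟩⟩⟩ <;>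
      simp at h7
    exact cpf_core a b c d e f g
  · simp [h7]
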